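-- pv_equiv track=rewrite | github.com/kulikz/kulikz-BMSTU_Python_KulikovAA | lab5/laboratory_work_05.1.py | find_max_repeating_number
-- ===== SOURCE A (Python) =====
-- def find_max_repeating_number(matrix):
--     # Создаем словарь для подсчета частоты чисел
--     frequency = {}
--     rows = len(matrix)
--     cols = len(matrix[0]) if rows > 0 else 0
--
--     # Подсчитываем частоту каждого числа
--     for i in range(rows):
--         for j in range(cols):
--             num = matrix[i][j]
--             frequency[num] = frequency.get(num, 0) + 1
--     # Ищем максимальное число, встречающееся более одного раза
--     max_repeating = None
--     for num, count in frequency.items():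
--         if count > 1:
--             if max_repeating is None or num > max_repeating:
--                 max_repeating = num
--     return max_repeating
-- ===== SOURCE B (Python) =====
-- def find_max_repeating_number(matrix):
--     rows = len(matrix)
--     cols = len(matrix[0]) if rows > 0 else 0
--     values = [matrix[i][j] for i in range(rows) for j in range(cols)]
--     values.sort(reverse=True)
--     for k in range(len(values) - 1):
--         if values[k] == values[k + 1]:
--             return values[k]
--     return None
-- ===== Notes on version B (the rewrite author's own statement) =====
-- stated objective: alternative
-- what changed: Replaces the frequency dictionary and second pass over its items by flattening the rectangle into one list, sorting it in descending order, and returning the first element equal to its successor (sort-then-adjacent-scan).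
import Mathlib
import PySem

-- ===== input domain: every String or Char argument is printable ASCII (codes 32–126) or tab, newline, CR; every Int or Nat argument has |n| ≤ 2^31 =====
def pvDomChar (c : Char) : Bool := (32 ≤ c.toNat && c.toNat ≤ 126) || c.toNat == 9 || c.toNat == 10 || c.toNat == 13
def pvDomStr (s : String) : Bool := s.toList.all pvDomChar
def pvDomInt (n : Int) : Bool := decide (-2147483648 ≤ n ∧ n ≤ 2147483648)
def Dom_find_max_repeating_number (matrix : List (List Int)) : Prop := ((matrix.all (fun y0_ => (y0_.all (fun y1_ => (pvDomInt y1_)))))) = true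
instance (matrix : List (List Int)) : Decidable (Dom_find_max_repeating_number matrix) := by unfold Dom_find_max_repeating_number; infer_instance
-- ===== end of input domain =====

-- B replaces A's frequency dictionary and item scan by flattening the rectangle,
-- sorting it in descending order and returning the first adjacent equal pair (alternative algorithm).


-- ===== PORT A =====
-- Literal transliteration of A: count frequencies in a dict over the rows×cols rectangle
-- (cols = length of the first row), then scan the dict items for the largest key with count > 1.
-- matrix[i][j] is ported with the total pyGetD form; Pre_ below keeps every index in range.
def find_max_repeating_number (matrix : List (List Int)) : Option Int :=
  let rows : Int := (matrix.length : Int)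
  let cols : Int := if rows > 0 then ((PySem.List.pyGetD matrix 0 []).length : Int) else 0
  let frequency : PySem.Dict Int Int :=
    (PySem.List.pyRange 0 rows).foldl (fun d i =>
      (PySem.List.pyRange 0 cols).foldl (fun d j =>
        let num := PySem.List.pyGetD (PySem.List.pyGetD matrix i []) j 0
        d.insert num (d.getD num 0 + 1)) d) (PySem.Dict.empty : PySem.Dict Int Int)
  frequency.items.foldl (fun (max_repeating : Option Int) (p : Int × Int) =>
    if p.2 > 1 then
      match max_repeating with
      | none => some p.1
      | some m => if p.1 > m then some p.1 else max_repeating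
    else max_repeating) none

-- ===== PORT B =====
-- the 'for k in range(len(values)-1): if values[k] == values[k+1]: return values[k]' scan,
-- transcribed as the structural recursion over consecutive elements
def pvAdjScan : List Int → Option Int
  | x :: y :: t => if x = y then some x else pvAdjScan (y :: t)
  | _ => none

-- Literal transliteration of B: flatten the rectangle by a comprehension,
-- sort descending, return the first element equal to its successor.
def find_max_repeating_number_alt (matrix : List (List Int)) : Option Int :=
  let rows : Int := (matrix.length : Int)
  let cols : Int := if rows > 0 then ((PySem.List.pyGetD matrix 0 []).length : Int) else 0
  let values : List Int :=
    (PySem.List.pyRange 0 rows).flatMap (fun i =>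
      (PySem.List.pyRange 0 cols).map (fun j =>
        PySem.List.pyGetD (PySem.List.pyGetD matrix i []) j 0))
  pvAdjScan (PySem.List.sorted values (fun x => x) true)

-- ===== PRECONDITION & SPEC =====
-- Pre_ excludes exactly the ragged matrices on which Python A raises IndexError:
-- some row is shorter than the first row (A reads matrix[i][j] for all j < len(matrix[0])).
def Pre_find_max_repeating_number (matrix : List (List Int)) : Prop :=
  ∀ row ∈ matrix, (matrix.headD []).length ≤ row.length
instance (matrix : List (List Int)) : Decidable (Pre_find_max_repeating_number matrix) := by unfold Pre_find_max_repeating_number; infer_instance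
def pvWitness_find_max_repeating_number : List (List Int) := [[1, 2], [3, 1]]

def Spec_find_max_repeating_number (matrix : List (List Int)) (out : Option Int) : Prop := out = find_max_repeating_number_alt matrix
instance (matrix : List (List Int)) (out : Option Int) : Decidable (Spec_find_max_repeating_number matrix out) := by unfold Spec_find_max_repeating_number; infer_instance

-- ===== CLAIM (what is proved, stated in full; the proofs are below) =====
def Claim_equal_find_max_repeating_number : Prop := ∀ (matrix : List (List Int)), Dom_find_max_repeating_number matrix → Pre_find_max_repeating_number matrix → Spec_find_max_repeating_number matrix (find_max_repeating_number matrix)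

-- ===== LEMMAS AND PROOFS =====

-- The flattened list of values both programs visit, in visiting order.
def pvVals (matrix : List (List Int)) : List Int :=
  (PySem.List.pyRange 0 (matrix.length : Int)).flatMap (fun i =>
    (PySem.List.pyRange 0 (if (matrix.length : Int) > 0 then ((PySem.List.pyGetD matrix 0 []).length : Int) else 0)).map (fun j =>
      PySem.List.pyGetD (PySem.List.pyGetD matrix i []) j 0))

-- A's nested i/j loop is a fold of its body over pvVals.
lemma pvNested_foldl {σ : Type} (matrix : List (List Int)) (f : σ → Int → σ) (s : σ) :
    (PySem.List.pyRange 0 (matrix.length : Int)).foldl (fun s i =>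
      (PySem.List.pyRange 0 (if (matrix.length : Int) > 0 then ((PySem.List.pyGetD matrix 0 []).length : Int) else 0)).foldl (fun s j =>
        f s (PySem.List.pyGetD (PySem.List.pyGetD matrix i []) j 0)) s) s
    = (pvVals matrix).foldl f s := by
  rw [pvVals, List.foldl_flatMap]
  simp only [List.foldl_map]

-- the step updating the running maximum in A's final fold
def pvUpd (b : Option Int) (n : Int) : Option Int :=
  match b with
  | none => some n
  | some m => if n > m then some n else b

-- folding pvUpd from none is PySem.List.max? with the identity key
lemma pvFoldl_upd_eq_max? (l : List Int) :
    l.foldl pvUpd none = PySem.List.max? l (fun x => x) := by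
  unfold PySem.List.max?
  congr 1
  funext b n
  cases b <;> rfl

-- a guarded max-fold is the max-fold of the filtered list
lemma pvFoldl_guard (p : Int → Bool) (l : List Int) (b : Option Int) :
    l.foldl (fun b x => if p x then pvUpd b x else b) b = (l.filter p).foldl pvUpd b := by
  induction l generalizing b with
  | nil => rfl
  | cons x t ih =>
      by_cases h : p x <;> simp [h, ih]

-- max? with the identity key only depends on membership
lemma pvMax?_congr (l1 l2 : List Int) (h : ∀ x, x ∈ l1 ↔ x ∈ l2) :
    PySem.List.max? l1 (fun x => x) = PySem.List.max? l2 (fun x => x) := by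
  cases h1 : PySem.List.max? l1 (fun x => x) with
  | none =>
      rw [PySem.List.max?_eq_none_iff] at h1
      subst h1
      cases h2 : PySem.List.max? l2 (fun x => x) with
      | none => rfl
      | some m =>
          have := PySem.List.max?_mem h2
          exact absurd ((h m).mpr this) (List.not_mem_nil)
  | some m =>
      have hm1 : m ∈ l2 := (h m).mp (PySem.List.max?_mem h1)
      cases h2 : PySem.List.max? l2 (fun x => x) with
      | none =>
          rw [PySem.List.max?_eq_none_iff] at h2
          subst h2; exact absurd hm1 (List.not_mem_nil)
      | some m' =>
          have h12 : m ≤ m' := PySem.List.max?_isMax h2 m hm1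
          have h21 : m' ≤ m := PySem.List.max?_isMax h1 m' ((h m').mpr (PySem.List.max?_mem h2))
          exact congrArg some (le_antisymm h12 h21)

-- ===== A-side characterisation: A returns the max of the distinct values with count > 1 =====
lemma pvA_eq (matrix : List (List Int)) :
    find_max_repeating_number matrix
      = PySem.List.max?
          ((PySem.Set.ofList (pvVals matrix)).filter (fun k => decide ((1 : Int) < ((pvVals matrix).count k : Int))))
          (fun x => x) := by
  have hnest := pvNested_foldl matrix
    (fun d num => d.insert num (d.getD num 0 + 1)) (PySem.Dict.empty : PySem.Dict Int Int)
  simp only [find_max_repeating_number]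
  rw [hnest]
  have hcounter : (pvVals matrix).foldl (fun d num => d.insert num (d.getD num 0 + 1)) PySem.Dict.empty
      = PySem.Dict.counter (pvVals matrix) := (PySem.Dict.counter_eq_foldl _).symm
  rw [hcounter, PySem.Dict.items_counter, List.foldl_map,
    ← pvFoldl_upd_eq_max?, ← pvFoldl_guard]
  congr 1
  funext b k
  by_cases h : (1 : Int) < ((pvVals matrix).count k : Int)
  · rw [if_pos (by simpa using h), if_pos (by simpa using h)]
    cases b <;> rfl
  · rw [if_neg (by simpa using h), if_neg (by simpa using h)]

-- ===== B-side characterisation =====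

-- max? keeps a head that dominates the tail
lemma pvMax?_head (x : Int) (r : List Int) (h : ∀ z ∈ r, z ≤ x) :
    PySem.List.max? (x :: r) (fun y => y) = some x := by
  rw [PySem.List.max?_id_cons]
  congr 1
  induction r generalizing x with
  | nil => rfl
  | cons z t ih =>
      have hz : z ≤ x := h z (by simp)
      simp only [List.foldl_cons, max_eq_left hz]
      exact ih x (fun w hw => h w (by simp [hw]))

-- on a descending list, the adjacent scan finds the max of the values with count ≥ 2
lemma pvAdjScan_eq (l : List Int) (h : l.Pairwise (fun a b => b ≤ a)) :
    pvAdjScan l = PySem.List.max? (l.filter (fun x => decide (2 ≤ l.count x))) (fun x => x) := by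
  induction l with
  | nil => rfl
  | cons x t iht =>
      cases t with
      | nil =>
          simp [pvAdjScan, PySem.List.max?, List.filter]
      | cons y t2 =>
          have hx : ∀ z ∈ y :: t2, z ≤ x := by
            intro z hz; exact (List.pairwise_cons.mp h).1 z hz
          have htail : (y :: t2).Pairwise (fun a b => b ≤ a) := (List.pairwise_cons.mp h).2
          by_cases hxy : x = y
          · -- duplicate at the head: result is x, the overall max
            have hc : (2 : Nat) ≤ (x :: y :: t2).count x := by
              subst hxy
              simp
            have hfilter : (x :: y :: t2).filter (fun z => decide (2 ≤ (x :: y :: t2).count z))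
                = x :: ((y :: t2).filter (fun z => decide (2 ≤ (x :: y :: t2).count z))) := by
              rw [List.filter_cons, if_pos (by simpa using hc)]
            simp only [pvAdjScan, if_pos hxy, hfilter]
            refine (pvMax?_head x _ ?_).symm
            intro z hz
            exact hx z (List.mem_of_mem_filter hz)
          · -- head is unique: drop it from both sides
            have hxnot : x ∉ y :: t2 := by
              intro hmem
              rcases List.mem_cons.mp hmem with he | hm
              · exact hxy he
              · have h1 : x ≤ y := (List.pairwise_cons.mp htail).1 x hm
                have h2 : y ≤ x := hx y (by simp)
                exact hxy (le_antisymm h1 h2)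
            have hcx : (x :: y :: t2).count x = 1 := by
              rw [List.count_cons_self, List.count_eq_zero_of_not_mem hxnot]
            have hfilter : (x :: y :: t2).filter (fun z => decide (2 ≤ (x :: y :: t2).count z))
                = (y :: t2).filter (fun z => decide (2 ≤ (y :: t2).count z)) := by
              rw [List.filter_cons, if_neg (by simp [hcx])]
              apply List.filter_congr
              intro z hz
              have hzx : z ≠ x := fun e => hxnot (e ▸ hz)
              have : (x :: y :: t2).count z = (y :: t2).count z := by
                rw [List.count_cons_of_ne (fun e => hzx e.symm)]
              rw [this]
            simp only [pvAdjScan, if_neg hxy, hfilter]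
            exact iht htail

-- B equals the max of the distinct flattened values with count > 1
lemma pvB_eq (matrix : List (List Int)) :
    find_max_repeating_number_alt matrix
      = PySem.List.max?
          ((PySem.Set.ofList (pvVals matrix)).filter (fun k => decide ((1 : Int) < ((pvVals matrix).count k : Int))))
          (fun x => x) := by
  have hvals : find_max_repeating_number_alt matrix
      = pvAdjScan (PySem.List.sorted (pvVals matrix) (fun x => x) true) := rfl
  set l := PySem.List.sorted (pvVals matrix) (fun x => x) true with hl
  have hperm : l.Perm (pvVals matrix) := PySem.List.sorted_perm _ _ _
  have hpair : l.Pairwise (fun a b => b ≤ a) := PySem.List.sorted_pairwise_rev _ _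
  rw [hvals, pvAdjScan_eq l hpair]
  apply pvMax?_congr
  intro x
  simp only [List.mem_filter, PySem.Set.mem_ofList, decide_eq_true_eq]
  rw [hperm.mem_iff, hperm.count_eq]
  constructor
  · rintro ⟨hmem, hc⟩
    exact ⟨hmem, by exact_mod_cast by omega⟩
  · rintro ⟨hmem, hc⟩
    refine ⟨hmem, ?_⟩
    omega

-- ===== VERDICT (by name: the statement is the Claim_ definition above) =====
theorem find_max_repeating_number_spec : Claim_equal_find_max_repeating_number := by
  intro matrix _ _
  unfold Spec_find_max_repeating_number
  rw [pvA_eq, pvB_eq]
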